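-- pv_equiv track=rewrite | github.com/advy99/IPCD | Ejercicios_Python/ejercicios_cadenas/ej14.py | orden_alfabetico
-- ===== SOURCE A (Python) =====
-- def orden_alfabetico(palabra):
-- 	estan_ordenadas = True
-- 	valor_numerico_letra = -1
--
-- 	if len(palabra) > 0:
-- 		valor_numerico_letra = ord(palabra[0])
--
-- 	indice = 1
--
-- 	while estan_ordenadas and indice < len(palabra):
--
-- 		nuevo_valor_letra = ord(palabra[indice])
-- 		estan_ordenadas = valor_numerico_letra < nuevo_valor_letra
--
-- 		valor_numerico_letra = nuevo_valor_letra
--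
-- 		indice += 1
--
--
-- 	return estan_ordenadas
-- ===== SOURCE B (Python) =====
-- def orden_alfabetico(palabra):
-- 	return list(palabra) == sorted(palabra) and len(set(palabra)) == len(palabra)
-- ===== Notes on version B (the rewrite author's own statement) =====
-- stated objective: idiomatic
-- what changed: Replaces the index-driven while loop with early exit over adjacent ord comparisons by a sort-plus-uniqueness check: the word equals its sorted form and all characters are distinct.
import Mathlib
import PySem

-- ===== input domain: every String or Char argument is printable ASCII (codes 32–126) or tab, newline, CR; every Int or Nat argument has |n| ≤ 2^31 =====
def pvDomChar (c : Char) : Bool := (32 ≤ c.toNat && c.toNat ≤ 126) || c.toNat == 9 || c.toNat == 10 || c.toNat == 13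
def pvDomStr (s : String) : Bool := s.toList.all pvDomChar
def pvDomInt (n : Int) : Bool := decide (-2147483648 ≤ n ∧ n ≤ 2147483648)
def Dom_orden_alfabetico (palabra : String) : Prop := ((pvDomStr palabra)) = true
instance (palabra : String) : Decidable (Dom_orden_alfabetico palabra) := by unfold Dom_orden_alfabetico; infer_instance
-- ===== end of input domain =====

-- B checks `list(palabra) == sorted(palabra) and len(set(palabra)) == len(palabra)` instead of A's early-exit while loop over adjacent ord comparisons.

-- ===== PORT A =====
-- the while loop: state (estan_ordenadas, valor_numerico_letra), iterating over the remaining characters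
def pvLoopA : Bool → Int → List Char → Bool
  | b, _, [] => b
  | b, prev, c :: rest =>
    if b then pvLoopA (decide (prev < (c.toNat : Int))) (c.toNat : Int) rest
    else b

def orden_alfabetico (palabra : String) : Bool :=
  match palabra.toList with
  | [] => pvLoopA true (-1) []
  | c :: rest => pvLoopA true (c.toNat : Int) rest

-- ===== PORT B =====
def orden_alfabetico_alt (palabra : String) : Bool :=
  let cs := palabra.toList
  decide (cs = PySem.List.sorted cs (fun x => x) false)
    && decide ((PySem.Set.ofList cs).length = cs.length)

-- ===== PRECONDITION & SPEC =====
def Spec_orden_alfabetico (palabra : String) (out : Bool) : Prop := out = orden_alfabetico_alt palabra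
instance (palabra : String) (out : Bool) : Decidable (Spec_orden_alfabetico palabra out) := by unfold Spec_orden_alfabetico; infer_instance

-- ===== CLAIM (what is proved, stated in full; the proofs are below) =====
def Claim_equal_orden_alfabetico : Prop := ∀ (palabra : String), Dom_orden_alfabetico palabra → Spec_orden_alfabetico palabra (orden_alfabetico palabra)

-- ===== LEMMAS AND PROOFS =====

theorem char_lt_iff_toNat_lt (a b : Char) : a < b ↔ (a.toNat : Int) < (b.toNat : Int) := by
  constructor
  · intro h
    have : a.toNat < b.toNat := h
    exact_mod_cast this
  · intro h
    have : a.toNat < b.toNat := by exact_mod_cast h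
    exact this

theorem pvLoopA_false (prev : Int) (l : List Char) : pvLoopA false prev l = false := by
  cases l <;> simp [pvLoopA]

theorem pvLoopA_pairwise (c : Char) (rest : List Char) :
    pvLoopA true (c.toNat : Int) rest = decide (List.Pairwise (· < ·) (c :: rest)) := by
  induction rest generalizing c with
  | nil => simp [pvLoopA]
  | cons d t ih =>
    by_cases h : c < d
    · have hlt : ((c.toNat : Int) < (d.toNat : Int)) := (char_lt_iff_toNat_lt c d).1 h
      simp [pvLoopA, hlt, ih d]
      intro h1 _
      exact ⟨h, fun a ha => lt_trans h (h1 a ha)⟩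
    · have hnlt : ¬ ((c.toNat : Int) < (d.toNat : Int)) := fun hh => h ((char_lt_iff_toNat_lt c d).2 hh)
      have hnp : ¬ List.Pairwise (fun x1 x2 : Char => x1 < x2) (c :: d :: t) :=
        fun hp => h ((List.pairwise_cons.1 hp).1 d (by simp))
      simp [pvLoopA, hnlt, pvLoopA_false, hnp]

theorem ofList_length_iff_nodup (cs : List Char) :
    (PySem.Set.ofList cs).length = cs.length ↔ cs.Nodup := by
  constructor
  · intro h
    have hsub : PySem.Set.ofList cs ⊆ cs := fun x hx => (PySem.Set.mem_ofList cs x).1 hx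
    have hsp : List.Subperm (PySem.Set.ofList cs) cs := (PySem.Set.nodup_ofList cs).subperm hsub
    have hperm : (PySem.Set.ofList cs).Perm cs := hsp.perm_of_length_le (le_of_eq h.symm)
    exact hperm.nodup_iff.mp (PySem.Set.nodup_ofList cs)
  · intro h
    rw [PySem.Set.ofList_eq_self_of_nodup cs h]

theorem sorted_and_nodup_iff_pairwise (cs : List Char) :
    (cs = PySem.List.sorted cs (fun x => x) false ∧ (PySem.Set.ofList cs).length = cs.length)
      ↔ List.Pairwise (· < ·) cs := by
  rw [ofList_length_iff_nodup]
  constructor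
  · rintro ⟨hs, hn⟩
    have hle : cs.Pairwise (fun a b : Char => a ≤ b) := by
      rw [hs]; exact PySem.List.sorted_pairwise cs (fun x => x)
    exact (hle.and hn).imp (fun ⟨h1, h2⟩ => lt_of_le_of_ne h1 h2)
  · intro hp
    refine ⟨?_, hp.nodup⟩
    exact (PySem.List.sorted_eq_self_of_pairwise cs (fun x : Char => x) (hp.imp le_of_lt)).symm

-- ===== VERDICT (by name: the statement is the Claim_ definition above) =====
theorem orden_alfabetico_spec : Claim_equal_orden_alfabetico := by
  intro palabra _
  unfold Spec_orden_alfabetico orden_alfabetico orden_alfabetico_alt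
  cases h : palabra.toList with
  | nil => decide
  | cons c rest =>
    show pvLoopA true (c.toNat : Int) rest =
      (decide ((c :: rest) = PySem.List.sorted (c :: rest) (fun x => x) false)
        && decide ((PySem.Set.ofList (c :: rest)).length = (c :: rest).length))
    rw [pvLoopA_pairwise, Bool.eq_iff_iff]
    simp only [Bool.and_eq_true, decide_eq_true_eq]
    exact (sorted_and_nodup_iff_pairwise (c :: rest)).symm
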